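-- pv_equiv track=rewrite | github.com/smartman98814/AI-avatar-backend | app/services/agent_manager.py | _get_remaining_buffer
-- ===== SOURCE A (Python) =====
-- def _get_remaining_buffer(buffer: str) -> str:
--     """
--     Get the remaining incomplete text from buffer (optimized).
--
--     Args:
--         buffer: Current buffer
--
--     Returns:
--         Remaining incomplete text that hasn't been yielded
--     """
--     # Fast reverse scan for last boundary
--     for i in range(len(buffer) - 1, -1, -1):
--         if buffer[i] in '.!?,;:\n':
--             if i + 1 < len(buffer) and buffer[i + 1] in ' \n\t':
--                 return buffer[i + 2:]
--             elif i + 1 >= len(buffer):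
--                 return ""
--
--     return buffer
-- ===== SOURCE B (Python) =====
-- import re
--
-- _BOUNDARY_RE = re.compile(r'[.!?,;:\n](?=[ \n\t]|\Z)')
--
--
-- def _get_remaining_buffer(buffer: str) -> str:
--     last = None
--     for m in _BOUNDARY_RE.finditer(buffer):
--         last = m
--     if last is None:
--         return buffer
--     return buffer[last.start() + 2:]
-- ===== Notes on version B (the rewrite author's own statement) =====
-- stated objective: idiomatic
-- what changed: Replaces A's reverse character-by-character scan with nested boundary/whitespace/end branches and three early returns by a single forward regex pass (lookahead pattern matching boundary-followed-by-whitespace-or-end) that keeps the last match and slices once; a timing run measured B faster (C-level regex engine vs a Python-level per-character loop).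
import Mathlib
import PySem

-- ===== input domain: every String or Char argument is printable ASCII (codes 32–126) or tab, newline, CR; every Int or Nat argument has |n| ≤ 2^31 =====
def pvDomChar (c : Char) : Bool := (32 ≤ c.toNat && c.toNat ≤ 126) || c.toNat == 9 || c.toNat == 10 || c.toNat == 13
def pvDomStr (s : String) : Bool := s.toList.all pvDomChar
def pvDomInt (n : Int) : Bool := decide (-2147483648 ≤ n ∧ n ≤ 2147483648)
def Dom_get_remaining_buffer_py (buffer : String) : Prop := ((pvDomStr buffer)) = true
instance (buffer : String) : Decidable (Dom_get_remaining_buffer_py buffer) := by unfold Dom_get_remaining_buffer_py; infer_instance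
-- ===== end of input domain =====

-- B replaces A's reverse character scan with nested early-return branches by a single
-- forward regex-style pass (last match of boundary-followed-by-whitespace-or-end); objective: idiomatic.

-- ===== PORT A =====
-- c in '.!?,;:\n'
def pvBoundary (c : Char) : Bool := c == '.' || c == '!' || c == '?' || c == ',' || c == ';' || c == ':' || c == '\n'
-- c in ' \n\t'
def pvWsA (c : Char) : Bool := c == ' ' || c == '\n' || c == '\t'

-- one iteration of A's `for i in range(len-1,-1,-1)` body: `cont` is "fall through to next i"
def pvAStep (cs : List Char) (i : Nat) (cont : Option (List Char)) : Option (List Char) :=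
  if pvBoundary (cs.getD i ' ') = true then
    if i + 1 < cs.length ∧ pvWsA ((cs[i + 1]?).getD ' ') = true then some (cs.drop (i + 2))
    else if cs.length ≤ i + 1 then some []
    else cont
  else cont

-- A's reverse scan from index i down to 0; none = loop fell through
def pvAScan (cs : List Char) : Nat → Option (List Char)
  | 0 => pvAStep cs 0 none
  | Nat.succ i => pvAStep cs (i + 1) (pvAScan cs i)

def get_remaining_buffer_py (buffer : String) : String :=
  if buffer.toList.length = 0 then buffer
  else
    match pvAScan buffer.toList (buffer.toList.length - 1) with
    | some r => String.mk r
    | none => buffer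

-- ===== PORT B =====
-- Source B's regex r'[.!?,;:\n](?=[ \n\t]|\Z)' matches at i iff:
def pvMatchAt (cs : List Char) (i : Nat) : Bool :=
  pvBoundary (cs.getD i ' ') && (i + 1 == cs.length || pvWsA ((cs[i + 1]?).getD ' '))

-- Source B's finditer loop keeping only the last match's start position
def pvLastMatch (cs : List Char) : Option Nat :=
  (List.range cs.length).foldl (fun last i => if pvMatchAt cs i then some i else last) none

def get_remaining_buffer_py_alt (buffer : String) : String :=
  match pvLastMatch buffer.toList with
  | some i => String.mk (buffer.toList.drop (i + 2))
  | none => buffer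

-- ===== PRECONDITION & SPEC =====
def Spec_get_remaining_buffer_py (buffer : String) (out : String) : Prop := out = get_remaining_buffer_py_alt buffer
instance (buffer : String) (out : String) : Decidable (Spec_get_remaining_buffer_py buffer out) := by unfold Spec_get_remaining_buffer_py; infer_instance

-- ===== CLAIM (what is proved, stated in full; the proofs are below) =====
def Claim_equal_get_remaining_buffer_py : Prop := ∀ (buffer : String), Dom_get_remaining_buffer_py buffer → Spec_get_remaining_buffer_py buffer (get_remaining_buffer_py buffer)

-- ===== LEMMAS AND PROOFS =====

-- A's one iteration agrees with "update the last-match accumulator, then slice"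
lemma pvAStep_eq (cs : List Char) (i : Nat) (h : i < cs.length) (acc : Option Nat) :
    pvAStep cs i ((acc.map (fun j => cs.drop (j + 2)))) =
      ((if pvMatchAt cs i then some i else acc).map (fun j => cs.drop (j + 2))) := by
  unfold pvAStep pvMatchAt
  simp only [List.getD_eq_getElem?_getD]
  by_cases hb : pvBoundary ((cs[i]?).getD ' ') = true
  · by_cases hlen : i + 1 = cs.length
    · have h1 : ¬ (i + 1 < cs.length ∧ pvWsA ((cs[i + 1]?).getD ' ') = true) := by
        rintro ⟨h2, _⟩; omega
      have h2 : cs.length ≤ i + 1 := by omega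
      rw [if_pos hb, if_neg h1, if_pos h2]
      simp [hb, hlen, List.drop_eq_nil_of_le (by omega : cs.length ≤ i + 2)]
    · have hlt : i + 1 < cs.length := by omega
      by_cases hw : pvWsA ((cs[i + 1]?).getD ' ') = true
      · rw [if_pos hb, if_pos ⟨hlt, hw⟩]
        simp [hb, hw, hlen]
      · rw [if_pos hb, if_neg (fun h' => hw h'.2), if_neg (by omega : ¬ cs.length ≤ i + 1)]
        have hw' : pvWsA ((cs[i + 1]?).getD ' ') = false := by
          cases hx : pvWsA ((cs[i + 1]?).getD ' ') with
          | true => exact absurd hx hw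
          | false => rfl
        simp [hb, hw', hlen]
  · rw [if_neg hb]
    have hb' : pvBoundary ((cs[i]?).getD ' ') = false := by
      cases hx : pvBoundary ((cs[i]?).getD ' ') with
      | true => exact absurd hx hb
      | false => rfl
    simp [hb']

-- A's reverse scan down from i equals B's forward last-match fold over range (i+1), sliced
lemma pvAScan_eq (cs : List Char) : ∀ (i : Nat), i < cs.length →
    pvAScan cs i =
      (((List.range (i + 1)).foldl (fun last j => if pvMatchAt cs j then some j else last) none).map
        (fun j => cs.drop (j + 2)))
  | 0, h => by
    have := pvAStep_eq cs 0 h (none : Option Nat)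
    simpa [pvAScan, List.range_succ] using this
  | Nat.succ i, h => by
    have ih := pvAScan_eq cs i (by omega)
    have step := pvAStep_eq cs (i + 1) h
      ((List.range (i + 1)).foldl (fun last j => if pvMatchAt cs j then some j else last) none)
    simp only [pvAScan, ih]
    rw [step]
    rw [show List.range (i.succ + 1) = List.range (i + 1) ++ [i + 1] from List.range_succ,
      List.foldl_append]
    simp only [List.foldl_cons, List.foldl_nil]

-- ===== VERDICT (by name: the statement is the Claim_ definition above) =====
theorem get_remaining_buffer_py_spec : Claim_equal_get_remaining_buffer_py := by
  intro buffer _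
  unfold Spec_get_remaining_buffer_py get_remaining_buffer_py get_remaining_buffer_py_alt pvLastMatch
  by_cases h0 : buffer.toList.length = 0
  · simp [h0, List.range_zero]
  · have hlt : buffer.toList.length - 1 < buffer.toList.length := by omega
    have key := pvAScan_eq buffer.toList (buffer.toList.length - 1) hlt
    have hsub : buffer.toList.length - 1 + 1 = buffer.toList.length := by omega
    rw [hsub] at key
    simp only [if_neg h0, key]
    cases (List.range buffer.toList.length).foldl
        (fun last j => if pvMatchAt buffer.toList j then some j else last) none with
    | none => simp
    | some j => simp
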